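-- pv_equiv track=rewrite | github.com/stasm-skypro/codewars-5-kyu | Rectangle into Rectangles/Rectangle into Rectangles.py | rect_into_rects2
-- ===== SOURCE A (Python) =====
-- def rect_into_rects2(l, w):
--     from itertools import starmap
--     res = []
--     if l and w:
--         while True:
--             q, r = divmod(l, w)
--             res.extend((i*w, w) for i in range(2, q+1) for _ in range(q-i+1))
--             if not r:
--                 break
--             res.extend((r+i*w, w) for i in range(1, q+1))
--             l, w = w, r
--     return [*starmap("({}*{})".format, res)]
-- ===== SOURCE B (Python) =====
-- def rect_into_rects2(l, w):
--     def tile(a, b):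
--         return "({}*{})".format(a, b)
--
--     def rects(l, w):
--         if l == 0 or w == 0:
--             return []
--         q, r = divmod(l, w)
--         out = []
--         for i in range(2, q + 1):
--             out += [tile(i * w, w)] * (q - i + 1)
--         if r == 0:
--             return out
--         return out + [tile(r + i * w, w) for i in range(1, q + 1)] + rects(w, r)
--
--     return rects(l, w)
-- ===== Notes on version B (the rewrite author's own statement) =====
-- stated objective: alternative
-- what changed: Replaces the iterative while-True loop that swaps (l,w) and mutates a shared tuple list (formatted at the end via starmap) by a pure recursive helper rects(l,w) over the shrinking rectangle that builds and concatenates the formatted strings directly, producing each tile group by list-repetition instead of a nested generator.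
import Mathlib
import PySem

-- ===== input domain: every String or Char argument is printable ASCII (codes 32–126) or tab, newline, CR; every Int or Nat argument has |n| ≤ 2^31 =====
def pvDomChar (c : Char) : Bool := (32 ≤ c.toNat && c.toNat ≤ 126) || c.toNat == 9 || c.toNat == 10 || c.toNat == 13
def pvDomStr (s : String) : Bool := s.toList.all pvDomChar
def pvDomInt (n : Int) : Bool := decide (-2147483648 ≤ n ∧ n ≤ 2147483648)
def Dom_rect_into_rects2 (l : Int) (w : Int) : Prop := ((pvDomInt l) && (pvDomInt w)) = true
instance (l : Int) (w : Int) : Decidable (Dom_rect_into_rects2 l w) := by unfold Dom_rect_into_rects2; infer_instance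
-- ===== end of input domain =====

-- B replaces A's iterative while-loop with (l,w) swapping and deferred starmap formatting by a
-- pure recursive helper that concatenates the formatted strings directly (objective: alternative).

-- used by both ports' termination: Python's % (floor mod) shrinks |divisor|
theorem pvModNatAbsLt (a b : Int) (hb : b ≠ 0) : (PySem.Int.mod a b).natAbs < b.natAbs := by
  rcases lt_trichotomy b 0 with h | h | h
  · have := PySem.Int.mod_neg_bounds a h
    omega
  · exact absurd h hb
  · have h1 := PySem.Int.mod_nonneg a h
    have h2 := PySem.Int.mod_lt a h
    omega

-- ===== PORT A =====
-- the 'while True' loop of A; hw makes the recursion total (loop is only entered with w ≠ 0,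
-- and recurses with the nonzero remainder as new divisor)
def pvLoopA (l : Int) (w : Int) (hw : w ≠ 0) (res : List (Int × Int)) : List (Int × Int) :=
  let q := PySem.Int.floordiv l w
  let r := PySem.Int.mod l w
  let res1 := res ++ (PySem.List.pyRange 2 (q + 1)).flatMap
      (fun i => (PySem.List.pyRange 0 (q - i + 1)).map (fun _ => (i * w, w)))
  if hr : r = 0 then res1
  else
    pvLoopA w r hr (res1 ++ (PySem.List.pyRange 1 (q + 1)).map (fun i => (r + i * w, w)))
termination_by w.natAbs
decreasing_by exact pvModNatAbsLt l w hw

def rect_into_rects2 (l : Int) (w : Int) : List String :=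
  let res : List (Int × Int) := []
  let res := if hl : l ≠ 0 then (if hw : w ≠ 0 then pvLoopA l w hw res else res) else res
  res.map (fun p => "(" ++ PySem.Int.toStr p.1 ++ "*" ++ PySem.Int.toStr p.2 ++ ")")

-- ===== PORT B =====
def pvTile (a : Int) (b : Int) : String :=
  "(" ++ PySem.Int.toStr a ++ "*" ++ PySem.Int.toStr b ++ ")"

def pvRects (l : Int) (w : Int) : List String :=
  if h : l = 0 ∨ w = 0 then []
  else
    let q := PySem.Int.floordiv l w
    let r := PySem.Int.mod l w
    let out := (PySem.List.pyRange 2 (q + 1)).foldl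
        (fun acc i => acc ++ PySem.List.pyRepeat [pvTile (i * w) w] (q - i + 1)) []
    if r = 0 then out
    else out ++ (PySem.List.pyRange 1 (q + 1)).map (fun i => pvTile (r + i * w) w) ++ pvRects w r
termination_by w.natAbs
decreasing_by exact pvModNatAbsLt l w (by tauto)

def rect_into_rects2_alt (l : Int) (w : Int) : List String :=
  pvRects l w

-- ===== PRECONDITION & SPEC =====
def Spec_rect_into_rects2 (l : Int) (w : Int) (out : List String) : Prop := out = rect_into_rects2_alt l w
instance (l : Int) (w : Int) (out : List String) : Decidable (Spec_rect_into_rects2 l w out) := by unfold Spec_rect_into_rects2; infer_instance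

-- ===== CLAIM (what is proved, stated in full; the proofs are below) =====
def Claim_equal_rect_into_rects2 : Prop := ∀ (l : Int) (w : Int), Dom_rect_into_rects2 l w → Spec_rect_into_rects2 l w (rect_into_rects2 l w)

-- ===== LEMMAS AND PROOFS =====

theorem pvFmt_eq_tile (p : Int × Int) :
    "(" ++ PySem.Int.toStr p.1 ++ "*" ++ PySem.Int.toStr p.2 ++ ")" = pvTile p.1 p.2 := rfl

theorem pvMod_zero_left {w : Int} (hw : w ≠ 0) : PySem.Int.mod 0 w = 0 := by
  simp [PySem.Int.mod, Int.fmod]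

theorem pvFloordiv_zero_left {w : Int} (hw : w ≠ 0) : PySem.Int.floordiv 0 w = 0 := by
  simp [PySem.Int.floordiv]

-- the loop of A, mapped through the formatter, is B's recursion appended to the accumulator
theorem pvLoop_eq_rects (n : Nat) (l w : Int) (hw : w ≠ 0) (res : List (Int × Int))
    (hn : w.natAbs = n) :
    (pvLoopA l w hw res).map (fun p => pvTile p.1 p.2)
      = res.map (fun p => pvTile p.1 p.2) ++ pvRects l w := by
  induction n using Nat.strong_induction_on generalizing l w res with
  | _ n ih =>
    rw [pvLoopA, pvRects]
    simp only []
    by_cases hl : l = 0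
    · subst hl
      rw [pvMod_zero_left hw, pvFloordiv_zero_left hw]
      simp [PySem.List.pyRange_one_eq_nil (by norm_num : (1 : Int) ≤ 2)]
    · rw [dif_neg (by tauto : ¬ (l = 0 ∨ w = 0))]
      set q := PySem.Int.floordiv l w with hq
      set r := PySem.Int.mod l w with hr
      have hblock :
          ((PySem.List.pyRange 2 (q + 1)).flatMap
              (fun i => (PySem.List.pyRange 0 (q - i + 1)).map (fun _ => (i * w, w)))).map
            (fun p => pvTile p.1 p.2)
          = (PySem.List.pyRange 2 (q + 1)).foldl
              (fun acc i => acc ++ PySem.List.pyRepeat [pvTile (i * w) w] (q - i + 1)) [] := by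
        rw [PySem.List.foldl_append_eq_flatMap, List.nil_append, List.map_flatMap]
        refine List.flatMap_congr (fun i _ => ?_)
        rw [PySem.List.pyRepeat_singleton, List.map_map]
        have : ((fun p : Int × Int => pvTile p.1 p.2) ∘ fun _ : Int => (i * w, w))
            = fun _ : Int => pvTile (i * w) w := rfl
        rw [this, List.map_const', PySem.List.length_pyRange_one]
        congr 1
        omega
      by_cases hr0 : r = 0
      · rw [dif_pos hr0, if_pos hr0]
        rw [List.map_append, hblock]
      · rw [dif_neg hr0, if_neg hr0]
        rw [ih (PySem.Int.mod l w).natAbs (hn ▸ pvModNatAbsLt l w hw) w r hr0 _ rfl]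
        simp only [List.map_append, List.map_map, hblock, List.append_assoc]
        congr 2

-- ===== VERDICT (by name: the statement is the Claim_ definition above) =====
theorem rect_into_rects2_spec : Claim_equal_rect_into_rects2 := by
  intro l w _
  unfold Spec_rect_into_rects2 rect_into_rects2 rect_into_rects2_alt
  simp only []
  by_cases hl : l ≠ 0
  · by_cases hw : w ≠ 0
    · rw [dif_pos hl, dif_pos hw]
      have h := pvLoop_eq_rects w.natAbs l w hw [] rfl
      simp only [List.map_nil, List.nil_append] at h
      simpa [pvFmt_eq_tile] using h
    · rw [dif_pos hl, dif_neg hw]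
      push_neg at hw
      rw [pvRects]
      simp [hw]
  · rw [dif_neg hl]
    push_neg at hl
    rw [pvRects]
    simp [hl]
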